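-- pv_equiv track=rewrite | github.com/Scottcjn/bottube | accessibility_utils.py | format_accessibility_report
-- ===== SOURCE A (Python) =====
-- def format_accessibility_report(page_issues):
--     """Format accessibility issues into a readable report"""
--
--     if not page_issues:
--         return "No accessibility issues found."
--
--     report_lines = ["Accessibility Issues Found:", ""]
--
--     issue_categories = {}
--     for issue in page_issues:
--         category = issue.get('category', 'General')
--         if category not in issue_categories:
--             issue_categories[category] = []
--         issue_categories[category].append(issue)
--
--     for category, issues in issue_categories.items():
--         report_lines.append(f"## {category}")
--         for i, issue in enumerate(issues, 1):
--             report_lines.append(f"{i}. {issue.get('description', 'Unknown issue')}")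
--             if issue.get('element'):
--                 report_lines.append(f"   Element: {issue['element']}")
--             if issue.get('suggestion'):
--                 report_lines.append(f"   Suggestion: {issue['suggestion']}")
--         report_lines.append("")
--
--     return "\n".join(report_lines)
-- ===== SOURCE B (Python) =====
-- def _issue_text(n, issue):
--     """One issue rendered as a single string (number, optional element/suggestion)."""
--     s = f"{n}. {issue.get('description', 'Unknown issue')}"
--     if issue.get('element'):
--         s += "\n   Element: " + issue['element']
--     if issue.get('suggestion'):
--         s += "\n   Suggestion: " + issue['suggestion']
--     return s
--
--
-- def format_accessibility_report(page_issues):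
--     """Format accessibility issues into a readable report"""
--
--     if not page_issues:
--         return "No accessibility issues found."
--
--     cats = list(dict.fromkeys(i.get('category', 'General') for i in page_issues))
--
--     out = "Accessibility Issues Found:\n"
--     for cat in cats:
--         group = [i for i in page_issues if i.get('category', 'General') == cat]
--         block = "\n".join(["## " + cat]
--                           + [_issue_text(n, i) for n, i in enumerate(group, 1)])
--         out += "\n" + block + "\n"
--     return out
-- ===== Notes on version B (the rewrite author's own statement) =====
-- stated objective: alternative
-- what changed: A builds a dict grouping categories to issue lists and joins one flat list of report lines at the end; B never builds a grouping or a line list: it takes the first-seen distinct categories, re-filters page_issues per category, renders each issue as one self-contained string and each category as one joined block, and concatenates the blocks directly into the output string.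
import Mathlib
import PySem

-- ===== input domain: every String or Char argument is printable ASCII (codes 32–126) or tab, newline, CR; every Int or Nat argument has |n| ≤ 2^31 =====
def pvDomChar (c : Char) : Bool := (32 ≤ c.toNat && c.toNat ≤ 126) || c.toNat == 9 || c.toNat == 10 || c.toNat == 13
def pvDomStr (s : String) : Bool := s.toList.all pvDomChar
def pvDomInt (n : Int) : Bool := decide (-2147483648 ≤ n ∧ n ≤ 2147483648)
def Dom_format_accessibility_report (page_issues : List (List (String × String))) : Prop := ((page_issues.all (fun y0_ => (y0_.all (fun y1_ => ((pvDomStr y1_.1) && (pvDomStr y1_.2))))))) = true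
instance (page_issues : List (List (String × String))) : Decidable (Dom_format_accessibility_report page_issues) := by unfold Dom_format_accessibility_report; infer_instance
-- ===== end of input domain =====

-- B replaces A's dict grouping + flat line list by first-seen distinct categories, a filtering
-- re-scan per category, one rendered string per issue and direct string concatenation of the
-- per-category blocks (alternative decomposition, not claimed faster).

-- shared helpers: issue.get(k) (dict lookup), issue.get('category','General'), string truthiness
def pvGet (issue : List (String × String)) (k : String) : Option String :=
  (PySem.Dict.mk issue).get? k

def pvCat (issue : List (String × String)) : String :=
  (pvGet issue "category").getD "General"

def pvTruthy (o : Option String) : Bool :=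
  match o with
  | some s => s ≠ ""
  | none => false

-- ===== PORT A =====
-- the three report lines for one numbered issue (A's inner loop body)
def pvLinesA (acc : List String) (p : Int × List (String × String)) : List String :=
  let acc := acc ++ [PySem.Int.toStr p.1 ++ ". " ++ (pvGet p.2 "description").getD "Unknown issue"]
  let acc := if pvTruthy (pvGet p.2 "element") then acc ++ ["   Element: " ++ (pvGet p.2 "element").getD ""] else acc
  if pvTruthy (pvGet p.2 "suggestion") then acc ++ ["   Suggestion: " ++ (pvGet p.2 "suggestion").getD ""] else acc

-- A's grouping-loop body: if category not in dict, set []; then append the issue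
def pvGroupStepA (d : PySem.Dict String (List (List (String × String)))) (issue : List (String × String)) : PySem.Dict String (List (List (String × String))) :=
  let c := pvCat issue
  let d' := if d.contains c then d else d.insert c []
  d'.insert c (d'.getD c [] ++ [issue])

-- A's per-category body: header, enumerate(issues, 1), blank line
def pvCatBodyA (acc : List String) (ci : String × List (List (String × String))) : List String :=
  ((PySem.List.enumerate ci.2 1).foldl pvLinesA (acc ++ ["## " ++ ci.1])) ++ [""]

def format_accessibility_report (page_issues : List (List (String × String))) : String :=
  if page_issues = [] then "No accessibility issues found."
  else
    let d := page_issues.foldl pvGroupStepA PySem.Dict.empty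
    PySem.Str.join "\n" (d.items.foldl pvCatBodyA ["Accessibility Issues Found:", ""])

-- ===== PORT B =====
-- one issue rendered as a single string (Source B's _issue_text)
def pvIssueTextB (n : Int) (issue : List (String × String)) : String :=
  let s := PySem.Int.toStr n ++ ". " ++ (pvGet issue "description").getD "Unknown issue"
  let s := if pvTruthy (pvGet issue "element") then s ++ "\n   Element: " ++ (pvGet issue "element").getD "" else s
  if pvTruthy (pvGet issue "suggestion") then s ++ "\n   Suggestion: " ++ (pvGet issue "suggestion").getD "" else s

-- one category block: header joined with the rendered issues of that category
def pvBlockB (page_issues : List (List (String × String))) (cat : String) : String :=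
  PySem.Str.join "\n" (("## " ++ cat) ::
    (PySem.List.enumerate (page_issues.filter (fun i => pvCat i == cat)) 1).map (fun p => pvIssueTextB p.1 p.2))

def format_accessibility_report_alt (page_issues : List (List (String × String))) : String :=
  if page_issues = [] then "No accessibility issues found."
  else
    -- list(dict.fromkeys(…)): first-seen distinct categories = PySem.Set.ofList
    let cats := PySem.Set.ofList (page_issues.map pvCat)
    cats.foldl (fun out cat => out ++ "\n" ++ pvBlockB page_issues cat ++ "\n") "Accessibility Issues Found:\n"

-- ===== PRECONDITION & SPEC =====
def Spec_format_accessibility_report (page_issues : List (List (String × String))) (out : String) : Prop := out = format_accessibility_report_alt page_issues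
instance (page_issues : List (List (String × String))) (out : String) : Decidable (Spec_format_accessibility_report page_issues out) := by unfold Spec_format_accessibility_report; infer_instance

-- ===== CLAIM (what is proved, stated in full; the proofs are below) =====
def Claim_equal_format_accessibility_report : Prop := ∀ (page_issues : List (List (String × String))), Dom_format_accessibility_report page_issues → Spec_format_accessibility_report page_issues (format_accessibility_report page_issues)

-- ===== LEMMAS AND PROOFS =====

-- ---- A-side characterisation: the grouping dict ----

lemma groupStepA_eq_modify (d : PySem.Dict String (List (List (String × String)))) (issue : List (String × String)) :
    pvGroupStepA d issue = d.modify (pvCat issue) [] (· ++ [issue]) := by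
  unfold pvGroupStepA PySem.Dict.modify
  by_cases h : d.contains (pvCat issue)
  · simp [h]
  · have h0 : d.contains (pvCat issue) = false := by simpa using h
    simp [h, PySem.Dict.insert_insert_self, PySem.Dict.getD_insert_self,
      PySem.Dict.getD_of_not_contains d [] h0]

lemma dictA_eq (page_issues : List (List (String × String))) :
    page_issues.foldl pvGroupStepA PySem.Dict.empty
      = (page_issues.map (fun i => (pvCat i, i))).foldl (fun d p => d.modify p.1 [] (· ++ [p.2])) PySem.Dict.empty := by
  rw [List.foldl_map]
  apply PySem.List.foldl_congr_mem
  intro d i _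
  exact groupStepA_eq_modify d i

lemma keysA (page_issues : List (List (String × String))) :
    (page_issues.foldl pvGroupStepA PySem.Dict.empty).keys = PySem.Set.ofList (page_issues.map pvCat) := by
  rw [dictA_eq]
  have := PySem.Dict.keys_foldl_modify_key (page_issues.map (fun i => (pvCat i, i))) Prod.fst []
    (fun _ p => (· ++ [p.2])) PySem.Dict.empty
  simp only [PySem.Dict.keys_empty] at this
  rw [this]
  rw [PySem.Set.ofList_eq_foldl]
  simp [PySem.Set.update, List.map_map, Function.comp_def]

lemma nodup_keysA (page_issues : List (List (String × String))) :
    (page_issues.foldl pvGroupStepA PySem.Dict.empty).keys.Nodup := by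
  rw [dictA_eq]
  exact PySem.Dict.nodup_keys_foldl_modify_key _ Prod.fst [] (fun _ p => (· ++ [p.2])) _ (by simp)

lemma getDA (page_issues : List (List (String × String))) (c : String) :
    (page_issues.foldl pvGroupStepA PySem.Dict.empty).getD c []
      = page_issues.filter (fun i => pvCat i == c) := by
  rw [dictA_eq, PySem.Dict.getD_foldl_modify_append]
  simp [List.filter_map, Function.comp_def]

-- ---- A-side: the flat line list as a flatMap ----

lemma linesA_shift (acc : List String) (p : Int × List (String × String)) :
    pvLinesA acc p = acc ++ pvLinesA [] p := by
  unfold pvLinesA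
  split_ifs <;> simp

lemma foldl_linesA (l : List (Int × List (String × String))) (acc : List String) :
    l.foldl pvLinesA acc = acc ++ l.flatMap (pvLinesA []) := by
  induction l generalizing acc with
  | nil => simp
  | cons x t ih =>
      simp only [List.foldl_cons, List.flatMap_cons]
      rw [linesA_shift, ih, List.append_assoc]

lemma catBodyA_eq (acc : List String) (ci : String × List (List (String × String))) :
    pvCatBodyA acc ci
      = acc ++ (("## " ++ ci.1) :: (PySem.List.enumerate ci.2 1).flatMap (pvLinesA [])) ++ [""] := by
  unfold pvCatBodyA
  rw [foldl_linesA]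
  simp

lemma foldl_catBodyA (l : List (String × List (List (String × String)))) (acc : List String) :
    l.foldl pvCatBodyA acc
      = acc ++ l.flatMap (fun ci => (("## " ++ ci.1) :: (PySem.List.enumerate ci.2 1).flatMap (pvLinesA [])) ++ [""]) := by
  induction l generalizing acc with
  | nil => simp
  | cons x t ih =>
      simp only [List.foldl_cons, List.flatMap_cons]
      rw [ih, catBodyA_eq, List.append_assoc]
      simp

-- ---- join lemmas ----

lemma join_cons_cons (a b : String) (l : List String) :
    PySem.Str.join "\n" (a :: b :: l) = a ++ "\n" ++ PySem.Str.join "\n" (b :: l) := by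
  apply String.toList_injective
  simp [PySem.Str.join, PySem.Chars.join, List.intercalate]

lemma join_singleton (a : String) : PySem.Str.join "\n" [a] = a := by
  apply String.toList_injective
  simp [PySem.Str.join, PySem.Chars.join, List.intercalate]

lemma join_append (xs ys : List String) (hx : xs ≠ []) (hy : ys ≠ []) :
    PySem.Str.join "\n" (xs ++ ys)
      = PySem.Str.join "\n" xs ++ "\n" ++ PySem.Str.join "\n" ys := by
  induction xs with
  | nil => exact absurd rfl hx
  | cons x t ih =>
      cases t with
      | nil =>
          cases ys with
          | nil => exact absurd rfl hy
          | cons y u => rw [join_singleton]; exact join_cons_cons x y u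
      | cons x' t' =>
          have ih' := ih (by simp)
          rw [List.cons_append] at ih'
          rw [List.cons_append, List.cons_append, join_cons_cons, ih', join_cons_cons x x']
          apply String.toList_injective
          simp

-- join of a flatMap of nonempty chunks = join of the per-chunk joins
lemma join_flatMap' {α : Type} (f : α → List String) (hf : ∀ x, f x ≠ []) (l : List α) (hl : l ≠ []) :
    PySem.Str.join "\n" (l.flatMap f)
      = PySem.Str.join "\n" (l.map (fun x => PySem.Str.join "\n" (f x))) := by
  induction l with
  | nil => exact absurd rfl hl
  | cons x t ih =>
      by_cases ht : t = []
      · subst ht; simp [join_singleton]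
      · have htf : t.flatMap f ≠ [] := by
          cases t with
          | nil => exact absurd rfl ht
          | cons y u =>
              simp only [List.flatMap_cons, ne_eq, List.append_eq_nil_iff, not_and]
              intro h; exact absurd h (hf y)
        have htm : t.map (fun x => PySem.Str.join "\n" (f x)) ≠ [] := by simp [ht]
        simp only [List.flatMap_cons, List.map_cons]
        rw [join_append (f x) (t.flatMap f) (hf x) htf, ih ht,
            ← List.singleton_append (l := t.map _),
            join_append [PySem.Str.join "\n" (f x)] _ (by simp) htm, join_singleton]

lemma join_flatMap {α : Type} (f : α → List String) (hf : ∀ x, f x ≠ []) (a : String) (l : List α) :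
    PySem.Str.join "\n" (a :: l.flatMap f)
      = PySem.Str.join "\n" (a :: l.map (fun x => PySem.Str.join "\n" (f x))) := by
  by_cases hl : l = []
  · subst hl; rfl
  · have htf : l.flatMap f ≠ [] := by
      cases l with
      | nil => exact absurd rfl hl
      | cons y u =>
          simp only [List.flatMap_cons, ne_eq, List.append_eq_nil_iff, not_and]
          intro h; exact absurd h (hf y)
    rw [← List.singleton_append (l := l.flatMap f), ← List.singleton_append (l := l.map _),
        join_append [a] _ (by simp) htf, join_append [a] _ (by simp) (by simp [hl]),
        join_flatMap' f hf l hl]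

-- the whole report: prefix lines then per-category chunks each ending in ""
lemma join_blocks {α : Type} (g : α → List String) (hg : ∀ x, g x ≠ []) (pre : List String) (hp : pre ≠ [])
    (l : List α) :
    PySem.Str.join "\n" (pre ++ l.flatMap (fun x => g x ++ [""]))
      = l.foldl (fun s x => s ++ "\n" ++ PySem.Str.join "\n" (g x) ++ "\n") (PySem.Str.join "\n" pre) := by
  induction l generalizing pre with
  | nil => simp
  | cons x t ih =>
      simp only [List.flatMap_cons, List.foldl_cons]
      rw [show pre ++ ((g x ++ [""]) ++ t.flatMap (fun x => g x ++ [""]))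
            = (pre ++ (g x ++ [""])) ++ t.flatMap (fun x => g x ++ [""]) by simp,
          ih (pre ++ (g x ++ [""])) (by simp)]
      congr 1
      rw [show pre ++ (g x ++ [""]) = (pre ++ g x) ++ [""] by simp,
          join_append (pre ++ g x) [""] (by simp [hp]) (by simp),
          join_append pre (g x) hp (hg x), join_singleton]
      apply String.toList_injective
      simp

-- per issue: A's 1–3 lines joined = B's single rendered string
lemma lines_join_eq_issueText (p : Int × List (String × String)) :
    PySem.Str.join "\n" (pvLinesA [] p) = pvIssueTextB p.1 p.2 := by
  unfold pvLinesA pvIssueTextB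
  split_ifs <;>
    (apply String.toList_injective;
     simp [PySem.Str.join, PySem.Chars.join, List.intercalate, List.intersperse])

-- per category: A's line chunk joined = B's block
lemma chunk_join_eq_block (page_issues : List (List (String × String))) (c : String) :
    PySem.Str.join "\n" (("## " ++ c) :: (PySem.List.enumerate (page_issues.filter (fun i => pvCat i == c)) 1).flatMap (pvLinesA []))
      = pvBlockB page_issues c := by
  unfold pvBlockB
  rw [join_flatMap (pvLinesA []) (fun p => by unfold pvLinesA; split_ifs <;> simp)]
  simp only [lines_join_eq_issueText]

-- ===== VERDICT (by name: the statement is the Claim_ definition above) =====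
theorem format_accessibility_report_spec : Claim_equal_format_accessibility_report := by
  intro page_issues _
  unfold Spec_format_accessibility_report format_accessibility_report format_accessibility_report_alt
  by_cases h : page_issues = []
  · simp [h]
  · simp only [h, if_false]
    rw [PySem.Dict.items_eq_map_keys _ (nodup_keysA page_issues) []]
    rw [foldl_catBodyA, join_blocks _ (fun ci => by simp) _ (by simp)]
    rw [List.foldl_map, keysA]
    have hinit : PySem.Str.join "\n" ["Accessibility Issues Found:", ""] = "Accessibility Issues Found:\n" := by
      apply String.toList_injective
      simp [PySem.Str.join, PySem.Chars.join, List.intercalate, List.intersperse]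
    rw [hinit]
    apply PySem.List.foldl_congr_mem
    intro s c _
    rw [getDA, chunk_join_eq_block]
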